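-- pv_equiv track=rewrite | github.com/AngheloAlf/2020-1_ProgCompetitiva | clases/03/5C/5c.py | contador_parentesis
-- ===== SOURCE A (Python) =====
-- def contador_parentesis(frase):
--     contador = 1
--     caracteres = 1
--     caracteres_ultimo_cero = 0
--     for i in range(len(frase)):
--         if frase[i] == "(":
--             contador += 1
--         elif frase[i] == ")":
--             contador -= 1
--         caracteres += 1
--         if contador < 0:
--             caracteres -= 1
--             return caracteres
--         if contador == 0:
--             caracteres_ultimo_cero = caracteres
--     #if contador != 0:
--     #    return 0
--     return caracteres_ultimo_cero
-- ===== SOURCE B (Python) =====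
-- def contador_parentesis(frase):
--     vals = []
--     c = 1
--     for ch in frase:
--         c += (ch == "(") - (ch == ")")
--         vals.append(c)
--     for i, v in enumerate(vals):
--         if v < 0:
--             return i + 1
--     for i in range(len(vals) - 1, -1, -1):
--         if vals[i] == 0:
--             return i + 2
--     return 0
-- ===== Notes on version B (the rewrite author's own statement) =====
-- stated objective: alternative
-- what changed: Replaces A's single stateful pass with early return by a three-phase scheme: precompute the running-counter sequence, scan it forward for the first negative value, else scan it back-to-front for the last zero.
import Mathlib
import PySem

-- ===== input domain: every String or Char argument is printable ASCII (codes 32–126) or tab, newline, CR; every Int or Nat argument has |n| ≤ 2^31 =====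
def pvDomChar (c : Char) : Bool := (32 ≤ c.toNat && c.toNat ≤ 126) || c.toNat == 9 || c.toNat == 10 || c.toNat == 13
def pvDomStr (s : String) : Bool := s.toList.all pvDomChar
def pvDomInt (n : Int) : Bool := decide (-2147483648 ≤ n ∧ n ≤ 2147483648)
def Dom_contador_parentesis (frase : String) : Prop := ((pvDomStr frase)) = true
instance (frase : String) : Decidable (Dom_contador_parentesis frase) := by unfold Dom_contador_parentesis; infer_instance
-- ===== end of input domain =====

-- B re-implements A with a precomputed counter sequence plus two separate scans (first-negative forward, last-zero backward); alternative decomposition, same O(n) cost.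

-- ===== PORT A =====
-- state = (contador, caracteres, caracteres_ultimo_cero); early return on contador < 0
def pvLoopA : List Char → Int → Int → Int → Int
  | [], _, _, z => z
  | ch :: rest, c, k, z =>
    let c' := if ch = '(' then c + 1 else if ch = ')' then c - 1 else c
    let k' := k + 1
    if c' < 0 then k' - 1
    else if c' = 0 then pvLoopA rest c' k' k'
    else pvLoopA rest c' k' z

def contador_parentesis (frase : String) : Int :=
  pvLoopA frase.toList 1 1 0

-- ===== PORT B =====
-- vals: running counter after each character (seeded at 1), as in Source B's first loop
def pvVals : List Char → Int → List Int
  | [], _ => []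
  | ch :: rest, c =>
    let c' := c + ((if ch = '(' then (1 : Int) else 0) - (if ch = ')' then (1 : Int) else 0))
    c' :: pvVals rest c'

-- forward scan: first index i with vals[i] < 0, returned as i+1
def pvFirstNeg : List Int → Int → Option Int
  | [], _ => none
  | v :: rest, i => if v < 0 then some (i + 1) else pvFirstNeg rest (i + 1)

-- backward scan over vals.reverse: last index i with vals[i] = 0, returned as i+2 (rest.length is that index)
def pvLastZeroRev : List Int → Int
  | [] => 0
  | v :: rest => if v = 0 then (rest.length : Int) + 2 else pvLastZeroRev rest

def contador_parentesis_alt (frase : String) : Int :=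
  let vals := pvVals frase.toList 1
  match pvFirstNeg vals 0 with
  | some r => r
  | none => pvLastZeroRev vals.reverse

-- ===== PRECONDITION & SPEC =====
def Spec_contador_parentesis (frase : String) (out : Int) : Prop := out = contador_parentesis_alt frase
instance (frase : String) (out : Int) : Decidable (Spec_contador_parentesis frase out) := by unfold Spec_contador_parentesis; infer_instance

-- ===== CLAIM (what is proved, stated in full; the proofs are below) =====
def Claim_equal_contador_parentesis : Prop := ∀ (frase : String), Dom_contador_parentesis frase → Spec_contador_parentesis frase (contador_parentesis frase)

-- ===== LEMMAS AND PROOFS =====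

-- forward version of the backward last-zero scan, used only as a proof intermediary
def pvG : List Int → Int → Int → Int
  | [], _, z => z
  | v :: rest, i, z => pvG rest (i + 1) (if v = 0 then i + 2 else z)

theorem pvG_append (xs : List Int) (v : Int) (off z : Int) :
    pvG (xs ++ [v]) off z = if v = 0 then off + (xs.length : Int) + 2 else pvG xs off z := by
  induction xs generalizing off z with
  | nil => simp [pvG]
  | cons u us ih =>
    simp only [List.cons_append, pvG, ih, List.length_cons]
    split_ifs <;> push_cast <;> ring_nf

theorem pvLastZeroRev_eq_pvG (xs : List Int) :
    pvLastZeroRev xs.reverse = pvG xs 0 0 := by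
  induction xs using List.reverseRecOn with
  | nil => simp [pvLastZeroRev, pvG]
  | append_singleton ys v ih =>
    rw [pvG_append]
    simp only [List.reverse_append, List.reverse_cons, List.reverse_nil, List.nil_append,
      List.singleton_append, pvLastZeroRev, List.length_reverse]
    rw [ih]
    split_ifs <;> simp

theorem pvLoopA_eq (l : List Char) : ∀ (c off z : Int),
    pvLoopA l c (off + 1) z =
      match pvFirstNeg (pvVals l c) off with
      | some r => r
      | none => pvG (pvVals l c) off z := by
  induction l with
  | nil => intro c off z; simp [pvLoopA, pvVals, pvFirstNeg, pvG]
  | cons ch rest ih =>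
    intro c off z
    have hc : (if ch = '(' then c + 1 else if ch = ')' then c - 1 else c)
        = c + ((if ch = '(' then (1 : Int) else 0) - (if ch = ')' then (1 : Int) else 0)) := by
      split_ifs <;> simp_all <;> ring
    simp only [pvLoopA, pvVals, pvFirstNeg, pvG, hc]
    set c' := c + ((if ch = '(' then (1 : Int) else 0) - (if ch = ')' then (1 : Int) else 0)) with hc'
    by_cases h1 : c' < 0
    · simp [h1]
    · by_cases h2 : c' = 0
      · simp only [h2, if_neg (by omega : ¬ (0:Int) < 0)]
        have := ih c' (off + 1) (off + 2)
        simp only [h2] at this ⊢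
        norm_num at this ⊢
        convert this using 2
        omega
      · simp only [if_neg h1, if_neg h2]
        have := ih c' (off + 1) z
        convert this using 2

-- ===== VERDICT (by name: the statement is the Claim_ definition above) =====
theorem contador_parentesis_spec : Claim_equal_contador_parentesis := by
  intro frase _
  unfold Spec_contador_parentesis contador_parentesis contador_parentesis_alt
  have h := pvLoopA_eq frase.toList 1 0 0
  norm_num at h
  rw [h]
  dsimp only
  rw [pvLastZeroRev_eq_pvG]
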